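-- pv_equiv track=rewrite | github.com/HAAIL-Universe/ForgeGuard | app/services/architecture_mapper.py | _check_for_boundaries
-- ===== SOURCE A (Python) =====
-- def _check_for_boundaries(tree_paths: list[str]) -> dict | None:
--     """Check if the project has governance/contract files."""
--     has_boundaries = any("boundaries.json" in p for p in tree_paths)
--     has_physics = any("physics" in p.lower() and p.endswith(".json") for p in tree_paths)
--     has_forge = any(p.endswith("forge.json") for p in tree_paths)
--
--     if not (has_boundaries or has_physics or has_forge):
--         return None
--
--     return {
--         "has_boundaries": has_boundaries,
--         "has_physics": has_physics,
--         "has_forge_json": has_forge,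
--     }
-- ===== SOURCE B (Python) =====
-- def _check_for_boundaries(tree_paths: list[str]) -> dict | None:
--     """Bitmask variant: classify each path into a 3-bit mask, OR-accumulate,
--     stop the scan as soon as the mask is saturated, decode bits at the end."""
--     mask = 0
--     for p in tree_paths:
--         m = 0
--         if "boundaries.json" in p:
--             m |= 1
--         if "physics" in p.lower() and p.endswith(".json"):
--             m |= 2
--         if p.endswith("forge.json"):
--             m |= 4
--         mask |= m
--         if mask == 7:
--             break
--     if mask == 0:
--         return None
--     return {
--         "has_boundaries": bool(mask & 1),
--         "has_physics": bool(mask & 2),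
--         "has_forge_json": bool(mask & 4),
--     }
-- ===== Notes on version B (the rewrite author's own statement) =====
-- stated objective: alternative
-- what changed: Replaces A's three boolean any() scans with a bitmask algorithm: each path is classified into a 3-bit mask, the masks are OR-accumulated in one traversal that terminates early once the mask is saturated (7), and the three flags are decoded from the mask's bits at the end.
import Mathlib
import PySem

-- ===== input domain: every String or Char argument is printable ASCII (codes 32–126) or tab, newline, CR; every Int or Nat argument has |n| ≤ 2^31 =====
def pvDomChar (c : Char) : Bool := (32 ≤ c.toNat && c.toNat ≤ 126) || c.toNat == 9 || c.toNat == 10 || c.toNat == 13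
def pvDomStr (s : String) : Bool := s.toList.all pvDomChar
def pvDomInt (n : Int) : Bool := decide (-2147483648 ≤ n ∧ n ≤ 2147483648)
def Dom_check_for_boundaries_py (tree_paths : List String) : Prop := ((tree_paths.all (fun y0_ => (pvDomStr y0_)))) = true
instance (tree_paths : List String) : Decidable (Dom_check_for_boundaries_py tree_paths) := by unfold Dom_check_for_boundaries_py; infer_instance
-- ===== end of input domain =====

-- B replaces A's three boolean any() scans with a single bitmask accumulation (OR of per-path 3-bit masks, early exit at saturation, bit decoding at the end); alternative decomposition, same cost.


-- ===== PORT A =====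
def check_for_boundaries_py (tree_paths : List String) : Option (List (String × Bool)) :=
  let has_boundaries := tree_paths.any (fun p => PySem.Str.isIn "boundaries.json" p)
  let has_physics := tree_paths.any (fun p => PySem.Str.isIn "physics" (PySem.Str.lower p) && PySem.Str.endswith p ".json")
  let has_forge := tree_paths.any (fun p => PySem.Str.endswith p "forge.json")
  if !(has_boundaries || has_physics || has_forge) then none
  else some [("has_boundaries", has_boundaries), ("has_physics", has_physics), ("has_forge_json", has_forge)]

-- ===== PORT B =====
def cfbPathMask (p : String) : Nat :=
  let m : Nat := 0
  let m := if PySem.Str.isIn "boundaries.json" p then m ||| 1 else m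
  let m := if PySem.Str.isIn "physics" (PySem.Str.lower p) && PySem.Str.endswith p ".json" then m ||| 2 else m
  let m := if PySem.Str.endswith p "forge.json" then m ||| 4 else m
  m

def cfbMaskRun : List String → Nat → Nat
  | [], mask => mask
  | p :: rest, mask =>
      let mask' := mask ||| cfbPathMask p
      if mask' = 7 then mask' else cfbMaskRun rest mask'

def check_for_boundaries_py_alt (tree_paths : List String) : Option (List (String × Bool)) :=
  let mask := cfbMaskRun tree_paths 0
  if mask = 0 then none
  else some [("has_boundaries", mask &&& 1 != 0), ("has_physics", mask &&& 2 != 0), ("has_forge_json", mask &&& 4 != 0)]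

-- ===== PRECONDITION & SPEC =====
def Spec_check_for_boundaries_py (tree_paths : List String) (out : Option (List (String × Bool))) : Prop := out = check_for_boundaries_py_alt tree_paths
instance (tree_paths : List String) (out : Option (List (String × Bool))) : Decidable (Spec_check_for_boundaries_py tree_paths out) := by unfold Spec_check_for_boundaries_py; infer_instance

-- ===== CLAIM (what is proved, stated in full; the proofs are below) =====
def Claim_equal_check_for_boundaries_py : Prop := ∀ (tree_paths : List String), Dom_check_for_boundaries_py tree_paths → Spec_check_for_boundaries_py tree_paths (check_for_boundaries_py tree_paths)

-- ===== LEMMAS AND PROOFS =====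
-- OR of all per-path masks (no early exit); proof-side characterisation of cfbMaskRun.
def cfbOr (l : List String) : Nat := l.foldr (fun p acc => cfbPathMask p ||| acc) 0

lemma cfb_lor_lt8 (a b : Nat) (ha : a < 8) (hb : b < 8) : a ||| b < 8 := by
  interval_cases a <;> interval_cases b <;> decide

lemma cfb_lor7 (b : Nat) (hb : b < 8) : 7 ||| b = 7 := by
  interval_cases b <;> decide

lemma cfbPathMask_lt8 (p : String) : cfbPathMask p < 8 := by
  unfold cfbPathMask; split_ifs <;> decide

lemma cfbOr_lt8 (l : List String) : cfbOr l < 8 := by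
  induction l with
  | nil => decide
  | cons p rest ih => exact cfb_lor_lt8 _ _ (cfbPathMask_lt8 p) ih

lemma cfbMaskRun_eq (l : List String) (m : Nat) (hm : m < 8) :
    cfbMaskRun l m = m ||| cfbOr l := by
  induction l generalizing m with
  | nil => simp [cfbMaskRun, cfbOr]
  | cons p rest ih =>
    have hm' : m ||| cfbPathMask p < 8 := cfb_lor_lt8 _ _ hm (cfbPathMask_lt8 p)
    simp only [cfbMaskRun, cfbOr, List.foldr_cons]
    split_ifs with h7
    · rw [← Nat.lor_assoc, h7]; exact (cfb_lor7 (cfbOr rest) (cfbOr_lt8 rest)).symm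
    · rw [ih _ hm', Nat.lor_assoc]; rfl

lemma cfbOr_eq_any (l : List String) :
    cfbOr l =
      (if l.any (fun p => PySem.Str.isIn "boundaries.json" p) then 1 else 0) |||
      (if l.any (fun p => PySem.Str.isIn "physics" (PySem.Str.lower p) && PySem.Str.endswith p ".json") then 2 else 0) |||
      (if l.any (fun p => PySem.Str.endswith p "forge.json") then 4 else 0) := by
  induction l with
  | nil => decide
  | cons p rest ih =>
    simp only [cfbOr, List.foldr_cons, List.any_cons] at *
    rw [ih, cfbPathMask]
    by_cases hb : PySem.Str.isIn "boundaries.json" p = true <;>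
      by_cases hp : (PySem.Str.isIn "physics" (PySem.Str.lower p) && PySem.Str.endswith p ".json") = true <;>
        by_cases hf : PySem.Str.endswith p "forge.json" = true <;>
          by_cases h1 : rest.any (fun p => PySem.Str.isIn "boundaries.json" p) = true <;>
            by_cases h2 : rest.any (fun p => PySem.Str.isIn "physics" (PySem.Str.lower p) && PySem.Str.endswith p ".json") = true <;>
              by_cases h3 : rest.any (fun p => PySem.Str.endswith p "forge.json") = true <;>
                simp only [hb, hp, hf, h1, h2, h3, Bool.not_eq_true] at * <;>
                  simp [*]

-- ===== VERDICT (by name: the statement is the Claim_ definition above) =====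
theorem check_for_boundaries_py_spec : Claim_equal_check_for_boundaries_py := by
  intro tree_paths _
  unfold Spec_check_for_boundaries_py check_for_boundaries_py check_for_boundaries_py_alt
  rw [cfbMaskRun_eq _ 0 (by decide), cfbOr_eq_any]
  cases tree_paths.any (fun p => PySem.Str.isIn "boundaries.json" p) <;>
    cases tree_paths.any (fun p => PySem.Str.isIn "physics" (PySem.Str.lower p) && PySem.Str.endswith p ".json") <;>
      cases tree_paths.any (fun p => PySem.Str.endswith p "forge.json") <;> simp
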